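-- pv_equiv track=rewrite | github.com/RamzesXX/code_advent_2024 | code_advent_2024/tasks/task_24.py | _build_z_number
-- ===== SOURCE A (Python) =====
-- def _build_z_number(wire_to_value: dict[str, int]) -> int:
--     z_number = 0
--     z_wires = [
--         wire_name
--         for wire_name in wire_to_value
--         if wire_name.startswith("z")
--     ]
--     z_wires.sort(reverse=True)
--     for z_wire in z_wires:
--         z_number = z_number * 2 + wire_to_value[z_wire]
--
--     return z_number
-- ===== SOURCE B (Python) =====
-- def _build_z_number(wire_to_value: dict[str, int]) -> int:
--     z_wires = [w for w in wire_to_value if w.startswith("z")]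
--     total = 0
--     for w in z_wires:
--         rank = sum(1 for u in z_wires if u < w)
--         total += wire_to_value[w] * 2 ** rank
--     return total
-- ===== Notes on version B (the rewrite author's own statement) =====
-- stated objective: alternative
-- what changed: Removes the sort entirely: each z-wire's bit position is computed as its rank (count of z-wire names strictly smaller than it, unique since dict keys), and the result is the positional sum value*2**rank, instead of A's descending sort followed by a Horner multiply-by-two accumulator.
import Mathlib
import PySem

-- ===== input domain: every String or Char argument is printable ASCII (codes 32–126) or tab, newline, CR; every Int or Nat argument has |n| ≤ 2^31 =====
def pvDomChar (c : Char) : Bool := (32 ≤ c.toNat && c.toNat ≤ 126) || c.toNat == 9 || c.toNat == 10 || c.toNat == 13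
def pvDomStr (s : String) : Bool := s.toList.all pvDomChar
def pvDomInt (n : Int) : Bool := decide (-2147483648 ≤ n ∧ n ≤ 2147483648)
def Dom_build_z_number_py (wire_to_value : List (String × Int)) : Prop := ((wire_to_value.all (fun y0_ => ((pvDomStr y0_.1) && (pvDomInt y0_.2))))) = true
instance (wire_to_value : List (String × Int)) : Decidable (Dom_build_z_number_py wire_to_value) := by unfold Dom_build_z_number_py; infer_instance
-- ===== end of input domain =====

-- B removes the sort: each z-wire's bit position is its rank (count of strictly smaller
-- z-wire names, unique since dict keys), summed as value * 2^rank (objective: alternative).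

-- ===== PORT A =====
def build_z_number_py (wire_to_value : List (String × Int)) : Int :=
  let d := PySem.Dict.ofList wire_to_value
  let z_wires := d.keys.filter (fun w => PySem.Str.startswith w "z")
  let z_wires := PySem.List.sorted z_wires (fun x => x) true
  z_wires.foldl (fun z_number z_wire => z_number * 2 + d.getD z_wire 0) 0

-- ===== PORT B =====
def build_z_number_py_alt (wire_to_value : List (String × Int)) : Int :=
  let d := PySem.Dict.ofList wire_to_value
  let z_wires := d.keys.filter (fun w => PySem.Str.startswith w "z")
  z_wires.foldl
    (fun total w =>
      let rank := z_wires.countP (fun u => decide (u < w))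
      total + d.getD w 0 * 2 ^ rank) 0

-- ===== PRECONDITION & SPEC =====
def Spec_build_z_number_py (wire_to_value : List (String × Int)) (out : Int) : Prop := out = build_z_number_py_alt wire_to_value
instance (wire_to_value : List (String × Int)) (out : Int) : Decidable (Spec_build_z_number_py wire_to_value out) := by unfold Spec_build_z_number_py; infer_instance

-- ===== CLAIM (what is proved, stated in full; the proofs are below) =====
def Claim_equal_build_z_number_py : Prop := ∀ (wire_to_value : List (String × Int)), Dom_build_z_number_py wire_to_value → Spec_build_z_number_py wire_to_value (build_z_number_py wire_to_value)

-- ===== LEMMAS AND PROOFS =====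

-- the positional value of an ascending bit list, least significant first
def pvW (f : String → Int) : List String → Int
  | [] => 0
  | x :: xs => pvW f xs * 2 + f x

theorem pvHorner_reverse (f : String → Int) (l : List String) :
    l.reverse.foldl (fun a w => a * 2 + f w) 0 = pvW f l := by
  induction l with
  | nil => rfl
  | cons x xs ih =>
    simp [List.reverse_cons, List.foldl_append, ih, pvW]

theorem pvSorted_rev_eq_reverse (xs : List String) (h : xs.Nodup) :
    PySem.List.sorted xs (fun x => x) true
      = (PySem.List.sorted xs (fun x => x) false).reverse := by
  have hperm : (PySem.List.sorted xs (fun x => x) false).Perm xs :=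
    PySem.List.sorted_perm xs (fun x => x) false
  have hnd : (PySem.List.sorted xs (fun x => x) false).Nodup := hperm.nodup_iff.mpr h
  have hle : (PySem.List.sorted xs (fun x => x) false).Pairwise (fun a b => a ≤ b) :=
    PySem.List.sorted_pairwise xs (fun x => x)
  have hlt : (PySem.List.sorted xs (fun x => x) false).Pairwise (fun a b => a < b) :=
    (hle.and hnd).imp (fun ⟨hab, hne⟩ => lt_of_le_of_ne hab hne)
  exact PySem.List.sorted_rev_eq_of_perm_of_pairwise_gt xs _ (fun x => x)
    ((List.reverse_perm _).trans hperm) ((List.pairwise_reverse).mpr hlt)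

-- B's fold is a plain sum of its per-element terms
theorem pvFold_sum (g : String → Int) (l : List String) (s : Int) :
    l.foldl (fun total w => total + g w) s = s + (l.map g).sum := by
  induction l generalizing s with
  | nil => simp
  | cons x xs ih => simp [List.foldl_cons, ih, add_assoc]

-- on a strictly sorted list, rank-weighted sum = positional value
theorem pvRankSum (f : String → Int) (l : List String)
    (h : l.Pairwise (fun a b : String => a < b)) :
    (l.map (fun w => f w * 2 ^ (l.countP (fun u => decide (u < w))))).sum = pvW f l := by
  induction l with
  | nil => simp [pvW]
  | cons x xs ih =>
    have hx : ∀ u ∈ xs, x < u := (List.pairwise_cons.mp h).1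
    have hxs : xs.Pairwise (fun a b : String => a < b) := (List.pairwise_cons.mp h).2
    have hcx : (x :: xs).countP (fun u => decide (u < x)) = 0 := by
      rw [List.countP_eq_zero]
      intro u hu
      simp only [List.mem_cons] at hu
      rcases hu with rfl | hu
      · simp
      · simp [not_lt.mpr (le_of_lt (hx u hu))]
    have hmap : xs.map (fun w => f w * 2 ^ ((x :: xs).countP (fun u => decide (u < w))))
        = xs.map (fun w => f w * 2 ^ (xs.countP (fun u => decide (u < w))) * 2) := by
      apply List.map_congr_left
      intro w hw
      rw [List.countP_cons]
      simp [hx w hw, pow_succ, mul_assoc]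
    rw [List.map_cons, List.sum_cons, hcx, hmap]
    have : (xs.map (fun w => f w * 2 ^ (xs.countP (fun u => decide (u < w))) * 2)).sum
        = (xs.map (fun w => f w * 2 ^ (xs.countP (fun u => decide (u < w))))).sum * 2 := by
      rw [← List.sum_map_mul_right]
    rw [this, ih hxs, pvW]
    ring

theorem build_z_number_py_spec : Claim_equal_build_z_number_py := by
  intro wire_to_value _
  unfold Spec_build_z_number_py build_z_number_py build_z_number_py_alt
  set d := PySem.Dict.ofList wire_to_value with hd
  set zs := d.keys.filter (fun w => PySem.Str.startswith w "z") with hzs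
  set f : String → Int := fun w => d.getD w 0 with hf
  show (PySem.List.sorted zs (fun x => x) true).foldl
      (fun z_number z_wire => z_number * 2 + f z_wire) 0
    = zs.foldl (fun total w => total + f w * 2 ^ (zs.countP (fun u => decide (u < w)))) 0
  have hnd : zs.Nodup := (PySem.Dict.nodup_keys_ofList wire_to_value).filter _
  set s := PySem.List.sorted zs (fun x => x) false with hs
  have hperm : s.Perm zs := PySem.List.sorted_perm zs (fun x => x) false
  have hslt : s.Pairwise (fun a b : String => a < b) :=
    ((PySem.List.sorted_pairwise zs (fun x => x)).and (hperm.nodup_iff.mpr hnd)).imp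
      (fun ⟨hab, hne⟩ => lt_of_le_of_ne hab hne)
  rw [pvSorted_rev_eq_reverse zs hnd, pvHorner_reverse, pvFold_sum, zero_add]
  -- replace the rank counted in zs by the rank counted in s (they are permutations)
  have hcnt : ∀ w, zs.countP (fun u => decide (u < w)) = s.countP (fun u => decide (u < w)) :=
    fun w => (hperm.countP_eq _).symm
  have hmaps : zs.map (fun w => f w * 2 ^ (zs.countP (fun u => decide (u < w))))
      = zs.map (fun w => f w * 2 ^ (s.countP (fun u => decide (u < w)))) := by
    apply List.map_congr_left; intro w _; rw [hcnt w]
  rw [hmaps, ← (hperm.map (fun w => f w * 2 ^ (s.countP (fun u => decide (u < w))))).sum_eq,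
    pvRankSum f s hslt]
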